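-- pv_equiv track=rewrite | github.com/DevashishPathrabe/Hackerrank | HackerRank Solutions/Problem Solving/Algorithms/Greedy/Beautiful Pairs/Beautiful Pairs.py | beautifulPairs
-- ===== SOURCE A (Python) =====
-- from collections import Counter
--
-- def beautifulPairs(A, B):
--     # Write your code here
--     result = 0
--     a = sorted(A)
--     b = sorted(B)
--     acount = Counter(a)
--     bcount = Counter(b)
--     spare = 0
--     for i in acount.items():
--         if i[0] in bcount:
--             get = bcount[i[0]]
--             result += min(i[1], get)
--         else:
--             spare += i[1]
--     if spare:
--         result += 1
--     else:
--         result -= 1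
--     return result
-- ===== SOURCE B (Python) =====
-- def beautifulPairs(A, B):
--     a = sorted(A)
--     b = sorted(B)
--     result = 0
--     i = j = 0
--     while i < len(a) and j < len(b):
--         if a[i] == b[j]:
--             result += 1
--             i += 1
--             j += 1
--         elif a[i] < b[j]:
--             i += 1
--         else:
--             j += 1
--     return result + (1 if set(A) - set(B) else -1)
-- ===== Notes on version B (the rewrite author's own statement) =====
-- stated objective: alternative
-- what changed: Replaces the Counter hash-map loop (min of per-value counts plus a 'spare' accumulator) by a two-pointer merge over the two sorted lists that counts matched pairs directly, with the +1/-1 adjustment decided by a set-difference emptiness test instead of the spare sum.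
import Mathlib
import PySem

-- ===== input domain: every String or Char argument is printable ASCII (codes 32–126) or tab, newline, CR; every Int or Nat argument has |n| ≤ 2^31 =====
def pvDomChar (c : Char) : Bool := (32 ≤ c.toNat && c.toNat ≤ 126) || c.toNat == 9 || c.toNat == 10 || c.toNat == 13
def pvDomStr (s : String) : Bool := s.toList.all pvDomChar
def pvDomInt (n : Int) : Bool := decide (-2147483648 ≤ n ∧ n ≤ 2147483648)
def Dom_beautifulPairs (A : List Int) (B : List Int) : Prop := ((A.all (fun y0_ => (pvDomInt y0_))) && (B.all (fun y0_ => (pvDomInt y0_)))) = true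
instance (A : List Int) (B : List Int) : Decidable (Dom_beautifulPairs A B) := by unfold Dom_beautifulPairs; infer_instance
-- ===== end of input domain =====

-- B replaces A's Counter loop by a two-pointer merge over the sorted lists plus a
-- set-difference test for the +1/-1 adjustment (alternative algorithm, same cost).

-- ===== PORT A =====
def beautifulPairs (A : List Int) (B : List Int) : Int :=
  let a := PySem.List.sorted A (fun x => x) false
  let b := PySem.List.sorted B (fun x => x) false
  let acount := PySem.Dict.counter a
  let bcount := PySem.Dict.counter b
  let rs := acount.items.foldl (fun (rs : Int × Int) i =>
      if bcount.contains i.1 then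
        -- bcount[i[0]]: the key is present (guarded by the contains test), so getD is exact here
        let get := bcount.getD i.1 0
        (rs.1 + min i.2 get, rs.2)
      else (rs.1, rs.2 + i.2)) (0, 0)
  if rs.2 ≠ 0 then rs.1 + 1 else rs.1 - 1

-- ===== PORT B =====
-- the while loop over indices i, j of Source B, as the obvious recursion on the two lists
def mergePairs : List Int → List Int → Int
  | x :: xs, y :: ys =>
    if x = y then 1 + mergePairs xs ys
    else if x < y then mergePairs xs (y :: ys)
    else mergePairs (x :: xs) ys
  | _, _ => 0

def beautifulPairs_alt (A : List Int) (B : List Int) : Int :=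
  let a := PySem.List.sorted A (fun x => x) false
  let b := PySem.List.sorted B (fun x => x) false
  let result := mergePairs a b
  -- set(A) - set(B) is nonempty iff some distinct element of A is not in set(B)
  result + (if (PySem.Set.ofList A).any (fun x => !(PySem.Set.ofList B).contains x) then 1 else -1)

-- ===== PRECONDITION & SPEC =====
def Spec_beautifulPairs (A : List Int) (B : List Int) (out : Int) : Prop := out = beautifulPairs_alt A B
instance (A : List Int) (B : List Int) (out : Int) : Decidable (Spec_beautifulPairs A B out) := by unfold Spec_beautifulPairs; infer_instance

-- ===== CLAIM (what is proved, stated in full; the proofs are below) =====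
def Claim_equal_beautifulPairs : Prop := ∀ (A : List Int) (B : List Int), Dom_beautifulPairs A B → Spec_beautifulPairs A B (beautifulPairs A B)

-- ===== LEMMAS AND PROOFS =====
theorem mergePairs_eq_inter_card (a b : List Int)
    (ha : a.Pairwise (· ≤ ·)) (hb : b.Pairwise (· ≤ ·)) :
    mergePairs a b = ((a : Multiset Int) ∩ (b : Multiset Int)).card := by
  induction a, b using mergePairs.induct
  case case1 xs x ys ih =>
    have h1 : ((x :: xs : List Int) : Multiset Int) ∩ ((x :: ys : List Int) : Multiset Int)
        = x ::ₘ ((xs : Multiset Int) ∩ (ys : Multiset Int)) := by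
      rw [← Multiset.cons_coe, ← Multiset.cons_coe,
        Multiset.cons_inter_of_pos _ (Multiset.mem_cons_self _ _), Multiset.erase_cons_head]
    rw [h1, Multiset.card_cons, mergePairs, if_pos rfl,
      ih (List.pairwise_cons.mp ha).2 (List.pairwise_cons.mp hb).2]
    push_cast; ring
  case case2 x xs y ys hne hlt ih =>
    have hx : (x : Int) ∉ (y :: ys) := by
      intro hmem
      have hyx : y ≤ x := by
        rcases List.mem_cons.mp hmem with rfl | h
        · exact le_of_eq rfl
        · exact List.rel_of_pairwise_cons hb h
      exact absurd hlt (not_lt.mpr hyx)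
    have h1 : ((x :: xs : List Int) : Multiset Int) ∩ ((y :: ys : List Int) : Multiset Int)
        = ((xs : Multiset Int)) ∩ ((y :: ys : List Int) : Multiset Int) := by
      rw [← Multiset.cons_coe, Multiset.cons_inter_of_neg _ (by simpa using hx)]
    rw [h1, mergePairs, if_neg hne, if_pos hlt, ih (List.pairwise_cons.mp ha).2 hb]
  case case3 x xs y ys hne hnlt ih =>
    have hyx : y < x := lt_of_le_of_ne (not_lt.mp hnlt) (fun h => hne h.symm)
    have hy : (y : Int) ∉ (x :: xs) := by
      intro hmem
      have hxy : x ≤ y := by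
        rcases List.mem_cons.mp hmem with rfl | h
        · exact le_of_eq rfl
        · exact List.rel_of_pairwise_cons ha h
      exact absurd hyx (not_lt.mpr hxy)
    have h1 : ((x :: xs : List Int) : Multiset Int) ∩ ((y :: ys : List Int) : Multiset Int)
        = ((x :: xs : List Int) : Multiset Int) ∩ ((ys : List Int) : Multiset Int) := by
      rw [Multiset.inter_comm, ← Multiset.cons_coe,
        Multiset.cons_inter_of_neg _ (by simpa using hy), Multiset.inter_comm]
    rw [h1, mergePairs, if_neg hne, if_neg hnlt, ih ha (List.pairwise_cons.mp hb).2]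
  case case4 p q h =>
    cases p with
    | nil => simp [mergePairs]
    | cons hd tl =>
      cases q with
      | nil => simp [mergePairs]
      | cons hd' tl' => exact absurd (h hd tl hd' tl' rfl rfl) (fun f => f)

theorem sum_min_counts (a b : List Int) :
    ((PySem.Set.ofList a).map (fun k => min (List.count k a) (List.count k b))).sum
      = (((a : Multiset Int)) ∩ (b : Multiset Int)).card := by
  have hfs : (PySem.Set.ofList a).toFinset = a.toFinset := by
    ext x; simp [PySem.Set.mem_ofList]
  rw [← List.sum_toFinset _ (PySem.Set.nodup_ofList a), hfs]
  calc ∑ x ∈ a.toFinset, min (List.count x a) (List.count x b)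
      = ∑ x ∈ a.toFinset, (↑a ∩ ↑b : Multiset Int).count x := by
        refine Finset.sum_congr rfl fun x _ => ?_
        rw [Multiset.count_inter]; simp
    _ = ∑ x ∈ (↑a ∩ ↑b : Multiset Int).toFinset, (↑a ∩ ↑b : Multiset Int).count x := by
        refine (Finset.sum_subset ?_ ?_).symm
        · intro x hx
          simp only [Multiset.mem_toFinset, Multiset.mem_inter] at hx
          simpa using hx.1
        · intro x _ hnx
          simp only [Multiset.mem_toFinset] at hnx
          exact Multiset.count_eq_zero.mpr hnx
    _ = _ := Multiset.toFinset_sum_count_eq _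

theorem sum_map_natCast (l : List Int) (f : Int → Nat) :
    (l.map (fun k => ((f k : Nat) : Int))).sum = ((l.map f).sum : Int) := by
  induction l with
  | nil => simp
  | cons x xs ih => simp [ih]

theorem sum_zero_iff_of_nonneg (l : List Int) (h : ∀ x ∈ l, 0 ≤ x) :
    l.sum = 0 ↔ ∀ x ∈ l, x = 0 := by
  induction l with
  | nil => simp
  | cons x xs ih =>
    have hx := h x (by simp)
    have hxs : ∀ y ∈ xs, 0 ≤ y := fun y hy => h y (by simp [hy])
    have hsum : 0 ≤ xs.sum := List.sum_nonneg hxs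
    simp only [List.sum_cons, List.mem_cons]
    constructor
    · intro h0
      have hx0 : x = 0 ∧ xs.sum = 0 := by omega
      intro y hy
      rcases hy with rfl | hy
      · exact hx0.1
      · exact ((ih hxs).mp hx0.2) y hy
    · intro hall
      have : x = 0 := hall x (Or.inl rfl)
      have : xs.sum = 0 := (ih hxs).mpr (fun y hy => hall y (Or.inr hy))
      omega

theorem fold_split (bc : PySem.Dict Int Int) (l : List (Int × Int)) (r s : Int) :
    l.foldl (fun (rs : Int × Int) i =>
      if bc.contains i.1 then (rs.1 + min i.2 (bc.getD i.1 0), rs.2)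
      else (rs.1, rs.2 + i.2)) (r, s)
    = (r + (l.map (fun i => if bc.contains i.1 then min i.2 (bc.getD i.1 0) else 0)).sum,
       s + (l.map (fun i => if bc.contains i.1 then 0 else i.2)).sum) := by
  induction l generalizing r s with
  | nil => simp
  | cons x xs ih =>
    simp only [List.foldl_cons, List.map_cons, List.sum_cons]
    split_ifs <;> (rw [ih]; simp only [Prod.mk.injEq]; constructor <;> ring)


-- ===== VERDICT (by name: the statement is the Claim_ definition above) =====
theorem beautifulPairs_spec : Claim_equal_beautifulPairs := by
  intro A B _
  unfold Spec_beautifulPairs beautifulPairs beautifulPairs_alt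
  set sa := PySem.List.sorted A (fun x => x) false with hsa
  set sb := PySem.List.sorted B (fun x => x) false with hsb
  simp only [PySem.Dict.items_counter]
  rw [fold_split]
  simp only [List.map_map, zero_add, Function.comp_def,
    PySem.Dict.contains_counter, PySem.Dict.getD_counter]
  have hpermA : sa.Perm A := PySem.List.sorted_perm A _ false
  have hpermB : sb.Perm B := PySem.List.sorted_perm B _ false
  have hres : (List.map (fun x => if sb.contains x = true then min (↑(List.count x sa) : Int) ↑(List.count x sb) else 0) (PySem.Set.ofList sa)).sum
      = mergePairs sa sb := by
    have hfun : ∀ x : Int, (if sb.contains x = true then min (↑(List.count x sa) : Int) ↑(List.count x sb) else 0)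
        = ((min (List.count x sa) (List.count x sb) : Nat) : Int) := by
      intro x
      by_cases h : sb.contains x = true
      · rw [if_pos h, Nat.cast_min]
      · have h0 : List.count x sb = 0 := by
          rw [List.count_eq_zero]
          exact fun hm => h (List.contains_iff_mem.mpr hm)
        rw [if_neg h, h0]
        simp
    simp only [hfun]
    rw [sum_map_natCast, sum_min_counts, mergePairs_eq_inter_card]
    · simpa using PySem.List.sorted_pairwise A (fun x => x)
    · simpa using PySem.List.sorted_pairwise B (fun x => x)
  have hiff : ∀ x, x ∈ sa →
      ((if sb.contains x = true then 0 else (↑(List.count x sa) : Int)) = 0 ↔ sb.contains x = true) := by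
    intro x hxm
    have hc : 0 < List.count x sa := List.count_pos_iff.mpr hxm
    by_cases h : sb.contains x = true
    · rw [if_pos h]
      simp only [h]
    · rw [if_neg h]
      constructor
      · intro h0
        have : List.count x sa = 0 := by exact_mod_cast h0
        omega
      · intro hcon
        exact absurd hcon h
  have hnn : ∀ y ∈ (List.map (fun x => if sb.contains x = true then 0 else (↑(List.count x sa) : Int)) (PySem.Set.ofList sa)), 0 ≤ y := by
    intro y hy
    obtain ⟨x, _, rfl⟩ := List.mem_map.mp hy
    split_ifs <;> positivity
  have hcond : ((List.map (fun x => if sb.contains x = true then 0 else (↑(List.count x sa) : Int)) (PySem.Set.ofList sa)).sum ≠ 0)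
      ↔ ((List.any (PySem.Set.ofList A) fun x => !(PySem.Set.ofList B).contains x) = true) := by
    rw [Ne, sum_zero_iff_of_nonneg _ hnn]
    constructor
    · intro hne
      push Not at hne
      obtain ⟨y, hy, hy0⟩ := hne
      obtain ⟨x, hx, rfl⟩ := List.mem_map.mp hy
      have hxsa : x ∈ sa := (PySem.Set.mem_ofList sa x).mp hx
      have hncon : ¬ sb.contains x = true := fun hcon => hy0 ((hiff x hxsa).mpr hcon)
      refine List.any_eq_true.mpr ⟨x, (PySem.Set.mem_ofList A x).mpr (hpermA.mem_iff.mp hxsa), ?_⟩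
      have hxnB : x ∉ B := fun hB =>
        hncon (List.contains_iff_mem.mpr (hpermB.mem_iff.mpr hB))
      simp [hxnB]
    · intro hany hall
      obtain ⟨x, hxA, hxb⟩ := List.any_eq_true.mp hany
      have hxnB : x ∉ B := by
        intro hB
        rw [Bool.not_eq_true'] at hxb
        have : (PySem.Set.ofList B).contains x = true :=
          List.contains_iff_mem.mpr ((PySem.Set.mem_ofList B x).mpr hB)
        rw [this] at hxb
        simp at hxb
      have hxsa : x ∈ sa := hpermA.mem_iff.mpr ((PySem.Set.mem_ofList A x).mp hxA)
      have h0 := hall _ (List.mem_map.mpr ⟨x, (PySem.Set.mem_ofList sa x).mpr hxsa, rfl⟩)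
      have hcon : sb.contains x = true := (hiff x hxsa).mp h0
      exact hxnB (hpermB.mem_iff.mp (List.contains_iff_mem.mp hcon))
  rw [hres]
  by_cases hc : (List.any (PySem.Set.ofList A) fun x => !(PySem.Set.ofList B).contains x) = true
  · rw [if_pos (hcond.mpr hc), if_pos hc]
  · rw [if_neg (fun h => hc (hcond.mp h)), if_neg hc]
    ring
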